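-- pv_equiv track=rewrite | github.com/cmudrc/design-research-analysis | src/design_research_analysis/table.py | _columnar_to_rows
-- ===== SOURCE A (Python) =====
-- from collections.abc import Callable, Iterable, Mapping, Sequence
-- from typing import Any
--
-- Row = dict[str, Any]
--
-- def _columnar_to_rows(data: Mapping[str, Sequence[Any]]) -> list[Row]:
--     lengths = {len(values) for values in data.values()}
--     if not lengths:
--         return []
--     if len(lengths) != 1:
--         raise ValueError("Columnar input must provide equally sized value arrays.")
--     size = lengths.pop()
--     rows: list[Row] = []
--     for idx in range(size):
--         rows.append({column: values[idx] for column, values in data.items()})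
--     return rows
-- ===== SOURCE B (Python) =====
-- def _columnar_to_rows(data):
--     rows = None
--     for column, values in data.items():
--         if rows is None:
--             rows = [{column: v} for v in values]
--         elif len(values) != len(rows):
--             raise ValueError("Columnar input must provide equally sized value arrays.")
--         else:
--             for row, v in zip(rows, values):
--                 row[column] = v
--     return rows if rows is not None else []
-- ===== Notes on version B (the rewrite author's own statement) =====
-- stated objective: alternative
-- what changed: Replaces A's two-stage row-major construction (length-set validation, then an index loop building each row dict by random access) with a single column-major fold: the first column seeds one single-key dict per value and each later column is zipped into the existing row dicts in lockstep, validating its length against the rows built so far.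
import Mathlib
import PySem

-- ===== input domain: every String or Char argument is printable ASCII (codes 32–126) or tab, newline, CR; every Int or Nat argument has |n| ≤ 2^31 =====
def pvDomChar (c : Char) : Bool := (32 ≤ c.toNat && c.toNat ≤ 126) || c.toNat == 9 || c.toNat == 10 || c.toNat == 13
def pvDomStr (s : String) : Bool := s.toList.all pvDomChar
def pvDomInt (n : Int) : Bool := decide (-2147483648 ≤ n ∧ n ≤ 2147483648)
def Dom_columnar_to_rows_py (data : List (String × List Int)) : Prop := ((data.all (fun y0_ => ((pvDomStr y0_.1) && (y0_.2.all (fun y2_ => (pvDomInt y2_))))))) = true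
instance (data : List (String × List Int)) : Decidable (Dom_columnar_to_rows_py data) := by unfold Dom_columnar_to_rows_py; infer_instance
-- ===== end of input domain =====

-- B builds the rows in ONE column-major fold (first column seeds the row dicts, each later
-- column is zipped into them, validating its length on the fly) instead of A's length-set
-- check followed by an index loop; objective: alternative, same cost.

-- ===== PORT A =====
-- A: build the set of column lengths, return [] if empty, raise if not a singleton,
-- else for idx in range(size) append the row dict {column: values[idx]}.
def columnar_to_rows_py (data : List (String × List Int)) : List (List (String × Int)) :=
  let lengths : PySem.Set Int := PySem.Set.ofList (data.map (fun p => (p.2.length : Int)))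
  if lengths = [] then []
  else if lengths.length ≠ 1 then []  -- raise ValueError — excluded by Pre_
  else
    let size := lengths.headI
    (PySem.List.pyRange 0 size 1).foldl
      (fun rows idx => rows ++ [data.map (fun p => (p.1, PySem.List.pyGetD p.2 idx 0))]) []

-- ===== PORT B =====
-- one step of B's loop body: seed from the first column, else length-check and zip the
-- column into the existing rows (row[column] = v appends the key at the end of each row dict)
def pvColStep (rows : Option (List (List (String × Int)))) (p : String × List Int) :
    Option (List (List (String × Int))) :=
  match rows with
  | none => some (p.2.map (fun v => [(p.1, v)]))
  | some rs =>
    if p.2.length ≠ rs.length then some rs  -- raise ValueError — excluded by Pre_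
    else some ((rs.zip p.2).map (fun q => q.1 ++ [(p.1, q.2)]))

def columnar_to_rows_py_alt (data : List (String × List Int)) : List (List (String × Int)) :=
  (data.foldl pvColStep none).getD []

-- ===== PRECONDITION & SPEC =====
-- Pre_ excludes exactly the inputs where A raises ValueError: columns of unequal length.
def Pre_columnar_to_rows_py (data : List (String × List Int)) : Prop :=
  ∀ p ∈ data, ∀ q ∈ data, p.2.length = q.2.length
instance (data : List (String × List Int)) : Decidable (Pre_columnar_to_rows_py data) := by unfold Pre_columnar_to_rows_py; infer_instance

def pvWitness_columnar_to_rows_py : (List (String × List Int)) := [("a", [1, 2]), ("b", [3, 4])]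

def Spec_columnar_to_rows_py (data : List (String × List Int)) (out : List (List (String × Int))) : Prop := out = columnar_to_rows_py_alt data
instance (data : List (String × List Int)) (out : List (List (String × Int))) : Decidable (Spec_columnar_to_rows_py data out) := by unfold Spec_columnar_to_rows_py; infer_instance

-- ===== CLAIM (what is proved, stated in full; the proofs are below) =====
def Claim_equal_columnar_to_rows_py : Prop := ∀ (data : List (String × List Int)), Dom_columnar_to_rows_py data → Pre_columnar_to_rows_py data → Spec_columnar_to_rows_py data (columnar_to_rows_py data)

-- ===== LEMMAS AND PROOFS =====

-- the common row list: row i pairs each key with element i of its column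
def pvRowsOf (ds : List (String × List Int)) (n : Nat) : List (List (String × Int)) :=
  (List.range n).map (fun i => ds.map (fun p => (p.1, p.2.getD i 0)))

theorem pvRowsOf_length (ds : List (String × List Int)) (n : Nat) :
    (pvRowsOf ds n).length = n := by simp [pvRowsOf]

theorem pvColAsRange {xs : List Int} {n : Nat} (h : xs.length = n) :
    xs = (List.range n).map (fun i => xs.getD i 0) := by
  apply List.ext_getElem
  · simp [h]
  · intro i hi _
    simp [List.getD_eq_getElem?_getD, List.getElem?_eq_getElem (by omega : i < xs.length)]

-- the set of lengths of a nonempty constant-length family is the singleton of that length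
theorem pvFoldlAddConst {xs : List Int} {a : Int} (h : ∀ x ∈ xs, x = a) :
    xs.foldl PySem.Set.add [a] = [a] := by
  induction xs with
  | nil => rfl
  | cons y ys ih =>
    have hy : y = a := h y (by simp)
    have : PySem.Set.add [a] y = [a] := by
      subst hy; simp [PySem.Set.add, PySem.Set.contains]
    simp only [List.foldl_cons, this]
    exact ih (fun x hx => h x (by simp [hx]))

theorem pvOfListConst {xs : List Int} {a : Int} (hne : xs ≠ []) (h : ∀ x ∈ xs, x = a) :
    PySem.Set.ofList xs = [a] := by
  match xs, hne with
  | y :: ys, _ =>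
    have hy : y = a := h y (by simp)
    subst hy
    have : PySem.Set.ofList (y :: ys) = ys.foldl PySem.Set.add [y] := by
      simp [PySem.Set.ofList_eq_foldl, PySem.Set.add, PySem.Set.contains]
    rw [this]
    exact pvFoldlAddConst (fun x hx => h x (by simp [hx]))

-- one pvColStep on pvRowsOf ds n extends every row with the new column
theorem pvStep_rowsOf (ds : List (String × List Int)) (q : String × List Int) (n : Nat)
    (hq : q.2.length = n) :
    pvColStep (some (pvRowsOf ds n)) q = some (pvRowsOf (ds ++ [q]) n) := by
  simp only [pvColStep]
  rw [if_neg (by simp [pvRowsOf_length, hq])]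
  congr 1
  conv_lhs => rw [pvColAsRange hq]
  unfold pvRowsOf
  rw [List.zip_map', List.map_map]
  apply List.map_congr_left
  intro i _
  simp

-- loop invariant of B's fold over the remaining columns
theorem pvFoldInv (n : Nat) (ps : List (String × List Int)) :
    ∀ (ds : List (String × List Int)), (∀ p ∈ ps, p.2.length = n) →
      ps.foldl pvColStep (some (pvRowsOf ds n)) = some (pvRowsOf (ds ++ ps) n) := by
  induction ps with
  | nil => intro ds _; simp
  | cons q qs ih =>
    intro ds hlen
    rw [List.foldl_cons, pvStep_rowsOf ds q n (hlen q (by simp)),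
        ih (ds ++ [q]) (fun p hp => hlen p (by simp [hp]))]
    simp

-- B computes pvRowsOf on a nonempty constant-length family
theorem pvAltEq (p : String × List Int) (ps : List (String × List Int))
    (hlen : ∀ q ∈ p :: ps, q.2.length = p.2.length) :
    columnar_to_rows_py_alt (p :: ps) = pvRowsOf (p :: ps) p.2.length := by
  unfold columnar_to_rows_py_alt
  rw [List.foldl_cons]
  have hinit : pvColStep none p = some (pvRowsOf [p] p.2.length) := by
    simp only [pvColStep, pvRowsOf]
    congr 1
    conv_lhs => rw [pvColAsRange (rfl : p.2.length = p.2.length)]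
    rw [List.map_map]
    simp
  rw [hinit, pvFoldInv p.2.length ps [p] (fun q hq => hlen q (by simp [hq]))]
  simp

-- A computes pvRowsOf on a nonempty constant-length family
theorem pvAEq (p : String × List Int) (ps : List (String × List Int))
    (hlen : ∀ q ∈ p :: ps, q.2.length = p.2.length) :
    columnar_to_rows_py (p :: ps) = pvRowsOf (p :: ps) p.2.length := by
  set data := p :: ps with hd
  set n := p.2.length with hn
  have hconst : ∀ x ∈ data.map (fun p => ((p.2.length : Int))), x = (n : Int) := by
    intro x hx
    obtain ⟨q, hq, rfl⟩ := List.mem_map.mp hx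
    exact_mod_cast hlen q hq
  have hset : PySem.Set.ofList (data.map (fun p => ((p.2.length : Int)))) = [(n : Int)] :=
    pvOfListConst (by rw [hd]; simp) hconst
  unfold columnar_to_rows_py
  simp only [hset]
  rw [if_neg (by simp), if_neg (by simp)]
  simp only [List.headI]
  rw [PySem.List.foldl_append_singleton_eq_map, List.nil_append]
  rw [PySem.List.pyRange_zero_nat]
  unfold pvRowsOf
  rw [List.map_map]
  apply List.map_congr_left
  intro i _
  simp only [Function.comp]
  apply List.map_congr_left
  intro q _
  simp [PySem.List.pyGetD_natCast]

-- ===== VERDICT (by name: the statement is the Claim_ definition above) =====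
theorem columnar_to_rows_py_spec : Claim_equal_columnar_to_rows_py := by
  intro data _ hpre
  unfold Spec_columnar_to_rows_py
  cases data with
  | nil => rfl
  | cons p ps =>
    have hlen : ∀ q ∈ p :: ps, q.2.length = p.2.length :=
      fun q hq => hpre q hq p (by simp)
    rw [pvAEq p ps hlen, pvAltEq p ps hlen]
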